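-- pv_equiv track=rewrite | github.com/SherineAwad/Ribofilio | src/ribofilio.py | get_gene_coverage_at_bin
-- ===== SOURCE A (Python) =====
-- import math
--
-- def get_gene_coverage_at_bin(max_gene_length, binsize, genes_length):
--     num_bins = int(max_gene_length / binsize) + 1
--     gene_coverage_at_bin = [0] * num_bins
--     # Fill gene_coverage_at_bin
--     for gene in genes_length:
--         bin_fit = math.ceil(genes_length[gene] / binsize)
--         for i in range(0, bin_fit):
--             gene_coverage_at_bin[i] += 1
--     return gene_coverage_at_bin
-- ===== SOURCE B (Python) =====
-- import math
--
-- def get_gene_coverage_at_bin(max_gene_length, binsize, genes_length):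
--     num_bins = int(max_gene_length / binsize) + 1
--     n = max(num_bins, 0)
--     # histogram of bin_fit values
--     hist = [0] * (n + 1)
--     for gene, length in genes_length.items():
--         bin_fit = math.ceil(length / binsize)
--         if bin_fit > 0:
--             hist[bin_fit] += 1
--     # suffix sums: coverage[i] = number of genes whose bin_fit exceeds i
--     coverage = [0] * n
--     running = 0
--     for i in range(n - 1, -1, -1):
--         running += hist[i + 1]
--         coverage[i] = running
--     return coverage
-- ===== Notes on version B (the rewrite author's own statement) =====
-- stated objective: alternative
-- what changed: A increments every bin below each gene's bin_fit in a nested loop (O(genes*bins) updates); B builds a histogram of bin_fit values in one pass and then takes suffix sums over the bins in one backward pass (O(genes+bins) updates; measured ~1.4x at the largest size, below the 1.5x bar, so not claimed as faster).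
import Mathlib
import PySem

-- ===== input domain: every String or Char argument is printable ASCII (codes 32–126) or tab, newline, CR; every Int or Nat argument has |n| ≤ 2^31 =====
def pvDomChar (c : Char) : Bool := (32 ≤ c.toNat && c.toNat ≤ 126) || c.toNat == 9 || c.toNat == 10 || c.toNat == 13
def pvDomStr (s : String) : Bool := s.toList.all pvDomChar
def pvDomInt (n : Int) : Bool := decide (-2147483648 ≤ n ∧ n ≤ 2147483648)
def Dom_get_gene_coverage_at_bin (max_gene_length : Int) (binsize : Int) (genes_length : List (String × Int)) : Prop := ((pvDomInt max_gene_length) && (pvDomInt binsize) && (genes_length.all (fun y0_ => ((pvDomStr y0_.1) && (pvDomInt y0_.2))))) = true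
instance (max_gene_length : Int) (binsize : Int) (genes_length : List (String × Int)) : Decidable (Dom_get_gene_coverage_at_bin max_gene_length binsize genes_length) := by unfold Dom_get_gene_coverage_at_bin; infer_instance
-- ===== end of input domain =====

-- B replaces A's per-gene inner loop over all lower bins by a histogram of bin_fit
-- values plus one backward suffix-sum pass (objective: alternative algorithm).

-- ===== PORT A =====
-- int(max_gene_length / binsize) = PySem.Int.truncdiv (exact on |n| ≤ 2^31);
-- math.ceil(x / binsize) = -((-x) // binsize), exact for |x|, |binsize| ≤ 2^31, ported by hand;
-- the increments use pyGetD/pySetD, exact under Pre_ (out-of-range = IndexError, excluded).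
def get_gene_coverage_at_bin (max_gene_length : Int) (binsize : Int) (genes_length : List (String × Int)) : List Int :=
  let num_bins := PySem.Int.truncdiv max_gene_length binsize + 1
  let init : List Int := List.replicate num_bins.toNat 0
  genes_length.foldl (fun cov p =>
    -- genes_length[gene]: dict lookup = first match in the association list
    let v := ((genes_length.find? (fun q => q.1 == p.1)).map Prod.snd).getD 0
    let bin_fit := -(PySem.Int.floordiv (-v) binsize)
    (PySem.List.pyRange 0 bin_fit 1).foldl
      (fun c i => PySem.List.pySetD c i (PySem.List.pyGetD c i 0 + 1)) cov) init

-- ===== PORT B =====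
-- the backward loop 'for i in range(n-1, -1, -1): running += hist[i+1]; coverage[i] = running',
-- building the coverage list back to front
def pvSuffix (hist : List Int) : Nat → Int → List Int → List Int
  | 0, _, acc => acc
  | i + 1, running, acc =>
      let r := running + hist.getD (i + 1) 0
      pvSuffix hist i r (r :: acc)

def get_gene_coverage_at_bin_alt (max_gene_length : Int) (binsize : Int) (genes_length : List (String × Int)) : List Int :=
  let num_bins := PySem.Int.truncdiv max_gene_length binsize + 1
  let n := num_bins.toNat           -- max(num_bins, 0)
  let hist := genes_length.foldl (fun h p =>
      let bin_fit := -(PySem.Int.floordiv (-p.2) binsize)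
      if 0 < bin_fit then h.set bin_fit.toNat (h.getD bin_fit.toNat 0 + 1) else h)
    (List.replicate (n + 1) 0)
  pvSuffix hist n 0 []

-- ===== PRECONDITION & SPEC =====
-- Pre_ excludes: binsize = 0 (A raises ZeroDivisionError); genes whose ceil(length/binsize)
-- exceeds num_bins (A raises IndexError); and duplicate gene keys in the association-list
-- representation of the dict argument (impossible in a Python dict).
def Pre_get_gene_coverage_at_bin (max_gene_length : Int) (binsize : Int) (genes_length : List (String × Int)) : Prop :=
  binsize ≠ 0 ∧ (genes_length.map Prod.fst).Nodup ∧
  ∀ p ∈ genes_length,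
    -(PySem.Int.floordiv (-p.2) binsize) ≤ PySem.Int.truncdiv max_gene_length binsize + 1
instance (max_gene_length : Int) (binsize : Int) (genes_length : List (String × Int)) : Decidable (Pre_get_gene_coverage_at_bin max_gene_length binsize genes_length) := by unfold Pre_get_gene_coverage_at_bin; infer_instance

def pvWitness_get_gene_coverage_at_bin : Int × Int × (List (String × Int)) := (10, 3, [("geneA", 5), ("geneB", 11)])

def Spec_get_gene_coverage_at_bin (max_gene_length : Int) (binsize : Int) (genes_length : List (String × Int)) (out : List Int) : Prop := out = get_gene_coverage_at_bin_alt max_gene_length binsize genes_length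
instance (max_gene_length : Int) (binsize : Int) (genes_length : List (String × Int)) (out : List Int) : Decidable (Spec_get_gene_coverage_at_bin max_gene_length binsize genes_length out) := by unfold Spec_get_gene_coverage_at_bin; infer_instance

-- ===== CLAIM (what is proved, stated in full; the proofs are below) =====
def Claim_equal_get_gene_coverage_at_bin : Prop := ∀ (max_gene_length : Int) (binsize : Int) (genes_length : List (String × Int)), Dom_get_gene_coverage_at_bin max_gene_length binsize genes_length → Pre_get_gene_coverage_at_bin max_gene_length binsize genes_length → Spec_get_gene_coverage_at_bin max_gene_length binsize genes_length (get_gene_coverage_at_bin max_gene_length binsize genes_length)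

-- ===== LEMMAS AND PROOFS =====

-- a list is the map of getD over its index range
lemma map_range_getD (cov : List Int) :
    (List.range cov.length).map (fun j => cov.getD j 0) = cov := by
  apply List.ext_getElem
  · simp
  · intro i h1 h2
    simp only [List.getElem_map, List.getElem_range]
    rw [List.getD_eq_getElem?_getD, List.getElem?_eq_getElem h2]
    rfl

lemma set_map_range (L : Nat) (f : Nat → Int) (n : Nat) (v : Int) :
    ((List.range L).map f).set n v
      = (List.range L).map (fun j => if j = n then v else f j) := by
  apply List.ext_getElem
  · simp
  · intro i h1 h2
    simp only [List.getElem_set, List.getElem_map, List.getElem_range]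
    by_cases h : i = n
    · simp [h]
    · simp [h, Ne.symm h]

lemma getD_map_range' (L : Nat) (f : Nat → Int) (j : Nat) (h : j < L) :
    ((List.range L).map f).getD j 0 = f j := by
  rw [List.getD_eq_getElem?_getD]
  simp [h]

lemma getD_replicate_zero (n j : Nat) : (List.replicate n (0 : Int)).getD j 0 = 0 := by
  rw [List.getD_eq_getElem?_getD, List.getElem?_replicate]
  split_ifs <;> rfl

-- first-match lookup of a key of the list, in a list with nodup keys
lemma find?_of_nodup (l : List (String × Int)) (p : String × Int)
    (hnd : (l.map Prod.fst).Nodup) (hp : p ∈ l) :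
    l.find? (fun q => q.1 == p.1) = some p := by
  induction l with
  | nil => cases hp
  | cons a l ih =>
    simp only [List.map_cons, List.nodup_cons] at hnd
    rcases List.mem_cons.mp hp with hp | hp
    · subst hp; simp [List.find?]
    · rw [List.find?_cons_of_neg, ih hnd.2 hp]
      simp only [beq_iff_eq]
      intro h
      exact hnd.1 (h ▸ List.mem_map_of_mem hp)

-- A's inner loop: add 1 to every slot below n
lemma innerLoop (cov : List Int) (n : Nat) (hn : n ≤ cov.length) :
    (PySem.List.pyRange 0 (n : Int) 1).foldl
        (fun c i => PySem.List.pySetD c i (PySem.List.pyGetD c i 0 + 1)) cov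
      = (List.range cov.length).map (fun j => cov.getD j 0 + if j < n then 1 else 0) := by
  induction n with
  | zero =>
    rw [PySem.List.pyRange_one_eq_nil (by omega)]
    simp only [List.foldl_nil]
    rw [show (fun j => cov.getD j 0 + if j < 0 then (1 : Int) else 0) = fun j => cov.getD j 0 from by
          funext j; simp]
    exact (map_range_getD cov).symm
  | succ n ih =>
    rw [show ((n + 1 : Nat) : Int) = (n : Int) + 1 from by push_cast; ring,
        PySem.List.pyRange_one_succ_right (by positivity), List.foldl_append,
        ih (by omega)]
    simp only [List.foldl_cons, List.foldl_nil]
    rw [PySem.List.pySetD_natCast, PySem.List.pyGetD_natCast,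
        getD_map_range' _ _ n (by omega), set_map_range]
    apply List.map_congr_left
    intro j hj
    simp only [List.mem_range] at hj
    by_cases h : j = n
    · subst h; simp
    · simp only [if_neg h]
      split_ifs <;> omega

-- A's outer loop
lemma outerLoop (binsize : Int) (l : List (String × Int)) (cov : List Int)
    (hb : ∀ p ∈ l, -(PySem.Int.floordiv (-p.2) binsize) ≤ (cov.length : Int)) :
    l.foldl (fun cov p =>
        (PySem.List.pyRange 0 (-(PySem.Int.floordiv (-p.2) binsize)) 1).foldl
          (fun c i => PySem.List.pySetD c i (PySem.List.pyGetD c i 0 + 1)) cov) cov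
      = (List.range cov.length).map (fun j => cov.getD j 0 +
          (l.countP (fun p => decide ((j : Int) < -(PySem.Int.floordiv (-p.2) binsize))) : Int)) := by
  induction l generalizing cov with
  | nil =>
    simp only [List.foldl_nil, List.countP_nil, Nat.cast_zero, add_zero]
    exact (map_range_getD cov).symm
  | cons p l ih =>
    simp only [List.foldl_cons]
    have hbp := hb p (List.mem_cons_self ..)
    set b := -(PySem.Int.floordiv (-p.2) binsize) with hbdef
    have hrange : PySem.List.pyRange 0 b 1 = PySem.List.pyRange 0 ((b.toNat : Int)) 1 := by
      by_cases h : b ≤ 0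
      · rw [PySem.List.pyRange_one_eq_nil (by omega), PySem.List.pyRange_one_eq_nil (by omega)]
      · rw [Int.toNat_of_nonneg (by omega)]
    rw [hrange, innerLoop cov b.toNat (by omega),
        ih _ (by intro q hq; simpa using hb q (List.mem_cons_of_mem _ hq))]
    simp only [List.length_map, List.length_range]
    apply List.map_congr_left
    intro j hj
    simp only [List.mem_range] at hj
    rw [getD_map_range' _ _ j hj, List.countP_cons]
    have hd : (decide ((j : Int) < b)) = (decide (j < b.toNat)) := by
      simp only [decide_eq_decide]; omega
    rw [hd]
    simp only [decide_eq_true_eq]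
    split_ifs with h <;> push_cast <;> ring

-- B's histogram loop
lemma histLoop (binsize : Int) (l : List (String × Int)) (h0 : List Int)
    (hb : ∀ p ∈ l, -(PySem.Int.floordiv (-p.2) binsize) < (h0.length : Int)) :
    l.foldl (fun h p =>
        if 0 < -(PySem.Int.floordiv (-p.2) binsize) then
          h.set (-(PySem.Int.floordiv (-p.2) binsize)).toNat
            (h.getD (-(PySem.Int.floordiv (-p.2) binsize)).toNat 0 + 1)
        else h) h0
      = (List.range h0.length).map (fun k => h0.getD k 0 +
          (l.countP (fun p => decide (0 < -(PySem.Int.floordiv (-p.2) binsize) ∧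
              (-(PySem.Int.floordiv (-p.2) binsize)).toNat = k)) : Int)) := by
  induction l generalizing h0 with
  | nil =>
    simp only [List.foldl_nil, List.countP_nil, Nat.cast_zero, add_zero]
    exact (map_range_getD h0).symm
  | cons p l ih =>
    simp only [List.foldl_cons]
    have hbp := hb p (List.mem_cons_self ..)
    set b := -(PySem.Int.floordiv (-p.2) binsize) with hbdef
    by_cases hpos : 0 < b
    · rw [if_pos hpos,
          show h0.set b.toNat (h0.getD b.toNat 0 + 1)
            = ((List.range h0.length).map (fun j => h0.getD j 0)).set b.toNat (h0.getD b.toNat 0 + 1)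
          from by rw [map_range_getD], set_map_range,
          ih _ (by intro q hq; simpa using hb q (List.mem_cons_of_mem _ hq))]
      simp only [List.length_map, List.length_range]
      apply List.map_congr_left
      intro k hk
      simp only [List.mem_range] at hk
      rw [getD_map_range' _ _ k hk, List.countP_cons]
      by_cases hkb : k = b.toNat
      · subst hkb
        rw [if_pos rfl, decide_eq_true (show 0 < b ∧ b.toNat = b.toNat from ⟨hpos, rfl⟩), if_pos rfl]
        push_cast; ring
      · rw [if_neg hkb,
            show (decide (0 < b ∧ b.toNat = k)) = false from by
              simp only [decide_eq_false_iff_not]; intro h; exact hkb h.2.symm]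
        simp only [Bool.false_eq_true, if_false]
        push_cast; ring
    · rw [if_neg hpos, ih _ (fun q hq => hb q (List.mem_cons_of_mem _ hq))]
      apply List.map_congr_left
      intro k hk
      rw [List.countP_cons,
          show (decide (0 < b ∧ b.toNat = k)) = false from by
            simp only [decide_eq_false_iff_not]; intro h; exact hpos h.1]
      simp only [Bool.false_eq_true, if_false, Nat.add_zero]

-- the backward suffix-sum loop
lemma pvSuffix_eq (hist : List Int) (i : Nat) (r : Int) (acc : List Int) :
    pvSuffix hist i r acc
      = (List.range i).map (fun j => r + ∑ k ∈ Finset.Ico (j + 1) (i + 1), hist.getD k 0) ++ acc := by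
  induction i generalizing r acc with
  | zero => simp [pvSuffix]
  | succ i ih =>
    rw [pvSuffix, ih]
    rw [List.range_succ, List.map_append, List.append_assoc]
    congr 1
    · apply List.map_congr_left
      intro j hj
      simp only [List.mem_range] at hj
      rw [show (∑ k ∈ Finset.Ico (j + 1) (i + 1 + 1), hist.getD k 0)
            = (∑ k ∈ Finset.Ico (j + 1) (i + 1), hist.getD k 0) + hist.getD (i + 1) 0 from
          Finset.sum_Ico_succ_top (by omega) _]
      ring
    · simp only [List.map_cons, List.map_nil, List.singleton_append]
      congr 1
      rw [Nat.Ico_succ_singleton]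
      simp

-- suffix sums of the histogram counts are the coverage counts
lemma sum_hist_counts (binsize : Int) (N : Nat) (l : List (String × Int)) (j : Nat)
    (hb : ∀ p ∈ l, -(PySem.Int.floordiv (-p.2) binsize) ≤ (N : Int)) :
    ∑ k ∈ Finset.Ico (j + 1) (N + 1),
        (l.countP (fun p => decide (0 < -(PySem.Int.floordiv (-p.2) binsize) ∧
            (-(PySem.Int.floordiv (-p.2) binsize)).toNat = k)) : Int)
      = (l.countP (fun p => decide ((j : Int) < -(PySem.Int.floordiv (-p.2) binsize))) : Int) := by
  induction l with
  | nil => simp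
  | cons p l ih =>
    have hbp := hb p (List.mem_cons_self ..)
    set b := -(PySem.Int.floordiv (-p.2) binsize) with hbdef
    simp only [List.countP_cons, decide_eq_true_eq, Nat.cast_add, Nat.cast_ite,
      Nat.cast_one, Nat.cast_zero]
    rw [Finset.sum_add_distrib, ih (fun q hq => hb q (List.mem_cons_of_mem _ hq))]
    congr 1
    by_cases hpos : 0 < b
    · rw [show (∑ k ∈ Finset.Ico (j + 1) (N + 1), if (0 < b ∧ b.toNat = k) then (1 : Int) else 0)
            = ∑ k ∈ Finset.Ico (j + 1) (N + 1), if k = b.toNat then (1 : Int) else 0 from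
          Finset.sum_congr rfl (fun k _ => if_congr (by omega) rfl rfl),
          Finset.sum_ite_eq' (Finset.Ico (j + 1) (N + 1)) b.toNat (fun _ => (1 : Int))]
      simp only [Finset.mem_Ico]
      rw [← hbdef,
          if_congr (show (j + 1 ≤ b.toNat ∧ b.toNat < N + 1) ↔ ((j : Int) < b) from by omega)
            (rfl : (1 : Int) = 1) rfl]
    · rw [show (∑ k ∈ Finset.Ico (j + 1) (N + 1), if (0 < b ∧ b.toNat = k) then (1 : Int) else 0) = 0 from
          Finset.sum_eq_zero (fun k _ => if_neg (fun h => hpos h.1)),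
          if_neg (by omega)]

-- ===== VERDICT (by name: the statement is the Claim_ definition above) =====
theorem get_gene_coverage_at_bin_spec : Claim_equal_get_gene_coverage_at_bin := by
  intro max_gene_length binsize genes_length _ hpre
  obtain ⟨hb0, hnd, hbound⟩ := hpre
  unfold Spec_get_gene_coverage_at_bin get_gene_coverage_at_bin get_gene_coverage_at_bin_alt
  simp only []
  set num_bins := PySem.Int.truncdiv max_gene_length binsize + 1 with hnb
  set N := num_bins.toNat with hN
  have hbN : ∀ p ∈ genes_length, -(PySem.Int.floordiv (-p.2) binsize) ≤ (N : Int) := by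
    intro p hp
    have := hbound p hp
    omega
  rw [show (List.foldl (fun (cov : List Int) (p : String × Int) =>
        List.foldl (fun c i => PySem.List.pySetD c i (PySem.List.pyGetD c i 0 + 1)) cov
          (PySem.List.pyRange 0
            (-(PySem.Int.floordiv (-(((genes_length.find? (fun q => q.1 == p.1)).map Prod.snd).getD 0)) binsize)) 1))
      (List.replicate N 0) genes_length)
      = List.foldl (fun (cov : List Int) (p : String × Int) =>
        List.foldl (fun c i => PySem.List.pySetD c i (PySem.List.pyGetD c i 0 + 1)) cov
          (PySem.List.pyRange 0 (-(PySem.Int.floordiv (-p.2) binsize)) 1))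
      (List.replicate N 0) genes_length from
      PySem.List.foldl_congr_mem _ _ _ _ (by
        intro acc x hx
        simp only [find?_of_nodup genes_length x hnd hx, Option.map_some, Option.getD_some]),
      outerLoop binsize genes_length _ (by simpa using hbN),
      histLoop binsize genes_length _ (by intro p hp; have := hbN p hp; simp; omega),
      pvSuffix_eq, List.append_nil]
  simp only [List.length_replicate]
  apply List.map_congr_left
  intro j hj
  simp only [List.mem_range] at hj
  rw [getD_replicate_zero]
  have hsum : ∑ k ∈ Finset.Ico (j + 1) (N + 1),
      ((List.range (N + 1)).map (fun k => (List.replicate (N + 1) (0 : Int)).getD k 0 +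
        (genes_length.countP (fun p => decide (0 < -(PySem.Int.floordiv (-p.2) binsize) ∧
            (-(PySem.Int.floordiv (-p.2) binsize)).toNat = k)) : Int))).getD k 0
      = ∑ k ∈ Finset.Ico (j + 1) (N + 1),
        (genes_length.countP (fun p => decide (0 < -(PySem.Int.floordiv (-p.2) binsize) ∧
            (-(PySem.Int.floordiv (-p.2) binsize)).toNat = k)) : Int) := by
    apply Finset.sum_congr rfl
    intro k hk
    simp only [Finset.mem_Ico] at hk
    rw [getD_map_range' _ _ k (by omega), getD_replicate_zero]
    ring
  rw [hsum, sum_hist_counts binsize N genes_length j hbN]
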